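-- pv_equiv track=rewrite | github.com/bassemZohdy/junit-agent-langgraph | src/agents/validate_test.py | _extract_stack_traces
-- ===== SOURCE A (Python) =====
-- from typing import Dict, List
--
-- def _extract_stack_traces(output: str) -> List[str]:
--     stack_traces = []
--
--     lines = output.split("\n")
--     current_trace = []
--     in_trace = False
--
--     for line in lines:
--         if line.strip().startswith("at "):
--             in_trace = True
--             current_trace.append(line.strip())
--         elif in_trace:
--             if line.strip() and not line.strip().startswith("at ") and not line.strip().startswith("Caused by:"):
--                 if current_trace:
--                     stack_traces.append("\n".join(current_trace))
--                     current_trace = []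
--                 in_trace = False
--             elif line.strip().startswith("Caused by:"):
--                 current_trace.append(line.strip())
--
--     if current_trace:
--         stack_traces.append("\n".join(current_trace))
--
--     return stack_traces
-- ===== SOURCE B (Python) =====
-- from typing import List
--
--
-- def _take_block(stripped: List[str]):
--     """Collect the stack-frame and cause lines of a block (blanks skipped);
--     return (kept lines, remaining lines after the terminating line)."""
--     kept = []
--     for idx, s in enumerate(stripped):
--         if s.startswith("at ") or s.startswith("Caused by:"):
--             kept.append(s)
--         elif s == "":
--             continue
--         else:
--             return kept, stripped[idx + 1:]
--     return kept, []
--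
--
-- def _extract_stack_traces(output: str) -> List[str]:
--     stripped = [line.strip() for line in output.split("\n")]
--     traces = []
--     while stripped:
--         if stripped[0].startswith("at "):
--             kept, stripped = _take_block(stripped)
--             traces.append("\n".join(kept))
--         else:
--             stripped = stripped[1:]
--     return traces
-- ===== Notes on version B (the rewrite author's own statement) =====
-- stated objective: idiomatic
-- what changed: Replaces the per-line boolean state machine (in_trace flag plus flush-on-other-line logic and a final flush) with a block-oriented scan over pre-stripped lines: each trace block beginning with a stack-frame line is collected in one helper pass that returns the kept lines and the rest of the input, so there is no mutable flag and no end-of-input flush.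
import Mathlib
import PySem

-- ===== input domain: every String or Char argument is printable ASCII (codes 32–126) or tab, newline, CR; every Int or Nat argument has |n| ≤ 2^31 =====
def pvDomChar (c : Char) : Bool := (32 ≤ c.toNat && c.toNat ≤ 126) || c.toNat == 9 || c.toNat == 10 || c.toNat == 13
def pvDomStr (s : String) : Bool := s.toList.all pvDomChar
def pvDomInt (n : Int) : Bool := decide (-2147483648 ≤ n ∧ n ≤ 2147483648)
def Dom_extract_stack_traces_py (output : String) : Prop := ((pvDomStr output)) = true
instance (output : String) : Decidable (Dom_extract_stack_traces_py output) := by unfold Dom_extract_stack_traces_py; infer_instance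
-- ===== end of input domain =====

-- B replaces A's per-line in_trace state machine by an idiomatic block-oriented scan
-- over pre-stripped lines (a helper collects one whole block and returns the rest).

-- ===== PORT A =====
-- one iteration of A's for-loop; state = (stack_traces, current_trace, in_trace)
def pvAStep (st : List String × List String × Bool) (line : String) :
    List String × List String × Bool :=
  let (stack_traces, current_trace, in_trace) := st
  if PySem.Str.startswith (PySem.Str.strip line) "at " then
    (stack_traces, current_trace ++ [PySem.Str.strip line], true)
  else if in_trace then
    if PySem.Str.strip line ≠ "" ∧
        ¬ PySem.Str.startswith (PySem.Str.strip line) "at " = true ∧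
        ¬ PySem.Str.startswith (PySem.Str.strip line) "Caused by:" = true then
      (if current_trace ≠ [] then stack_traces ++ [PySem.Str.join "\n" current_trace]
       else stack_traces, [], false)
    else if PySem.Str.startswith (PySem.Str.strip line) "Caused by:" then
      (stack_traces, current_trace ++ [PySem.Str.strip line], true)
    else st
  else st

def extract_stack_traces_py (output : String) : List String :=
  -- output.split("\n"): the separator is the literal "\n" ≠ "", so split? is always some
  let lines := (PySem.Str.split? output "\n").getD []
  let res := lines.foldl pvAStep ([], [], false)
  if res.2.1 ≠ [] then res.1 ++ [PySem.Str.join "\n" res.2.1] else res.1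

-- ===== PORT B =====
-- _take_block: collect the stack-frame and cause lines of one block (blanks skipped),
-- return (kept lines, remaining lines after the terminating line)
def pvTakeBlock : List String → List String × List String
  | [] => ([], [])
  | s :: rest =>
    if PySem.Str.startswith s "at " || PySem.Str.startswith s "Caused by:" then
      ((s :: (pvTakeBlock rest).1), (pvTakeBlock rest).2)
    else if s = "" then pvTakeBlock rest
    else ([], rest)

theorem pvTakeBlock_snd_length_le : ∀ (l : List String), (pvTakeBlock l).2.length ≤ l.length
  | [] => Nat.le_refl _
  | s :: rest => by
    unfold pvTakeBlock
    split
    · exact Nat.le_succ_of_le (pvTakeBlock_snd_length_le rest)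
    · split
      · exact Nat.le_succ_of_le (pvTakeBlock_snd_length_le rest)
      · exact Nat.le_succ _

-- pvTakeBlock consumes at least the head line (cited by pvBMain's termination proof)
theorem pvTakeBlock_keep (s : String) (rest : List String)
    (h : (PySem.Str.startswith s "at " || PySem.Str.startswith s "Caused by:") = true) :
    pvTakeBlock (s :: rest) = (s :: (pvTakeBlock rest).1, (pvTakeBlock rest).2) := by
  unfold pvTakeBlock; rw [if_pos h, pvTakeBlock.eq_def]

-- the while-loop of B's _extract_stack_traces, over the stripped lines
def pvBMain : List String → List String
  | [] => []
  | s :: rest =>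
    if h : PySem.Str.startswith s "at " then
      PySem.Str.join "\n" (pvTakeBlock (s :: rest)).1 :: pvBMain (pvTakeBlock (s :: rest)).2
    else pvBMain rest
termination_by l => l.length
decreasing_by
  · exact Nat.lt_succ_of_le (Nat.le_trans (Nat.le_refl _) (by
      rw [pvTakeBlock_keep s rest (Bool.or_eq_true_iff.mpr (Or.inl (by exact_mod_cast h)))]
      exact pvTakeBlock_snd_length_le rest))
  · exact Nat.lt_succ_self _

def extract_stack_traces_py_alt (output : String) : List String :=
  -- the separator is the literal "\n" ≠ "", so split? is always some
  pvBMain (((PySem.Str.split? output "\n").getD []).map PySem.Str.strip)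

-- ===== PRECONDITION & SPEC =====
def Spec_extract_stack_traces_py (output : String) (out : List String) : Prop := out = extract_stack_traces_py_alt output
instance (output : String) (out : List String) : Decidable (Spec_extract_stack_traces_py output out) := by unfold Spec_extract_stack_traces_py; infer_instance

-- ===== CLAIM (what is proved, stated in full; the proofs are below) =====
def Claim_equal_extract_stack_traces_py : Prop := ∀ (output : String), Dom_extract_stack_traces_py output → Spec_extract_stack_traces_py output (extract_stack_traces_py output)

-- ===== LEMMAS AND PROOFS =====

-- A's step in terms of the already-stripped line (proof helper)
def pvGStep (st : List String × List String × Bool) (s : String) :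
    List String × List String × Bool :=
  let (stack_traces, current_trace, in_trace) := st
  if PySem.Str.startswith s "at " then
    (stack_traces, current_trace ++ [s], true)
  else if in_trace then
    if s ≠ "" ∧ ¬ PySem.Str.startswith s "at " = true ∧
        ¬ PySem.Str.startswith s "Caused by:" = true then
      (if current_trace ≠ [] then stack_traces ++ [PySem.Str.join "\n" current_trace]
       else stack_traces, [], false)
    else if PySem.Str.startswith s "Caused by:" then
      (stack_traces, current_trace ++ [s], true)
    else st
  else st

-- A's final flush (proof helper)
def pvFinish (r : List String × List String × Bool) : List String :=
  if r.2.1 ≠ [] then r.1 ++ [PySem.Str.join "\n" r.2.1] else r.1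

theorem pvAStep_eq (st : List String × List String × Bool) (line : String) :
    pvAStep st line = pvGStep st (PySem.Str.strip line) := by
  obtain ⟨a, b, c⟩ := st; rfl

-- evaluation lemmas for pvGStep
theorem pvGStep_at (t c : List String) (b : Bool) (s : String)
    (hA : PySem.Str.startswith s "at " = true) :
    pvGStep (t, c, b) s = (t, c ++ [s], true) := by
  simp only [pvGStep]; rw [if_pos hA]

theorem pvGStep_off (t c : List String) (s : String)
    (hA : ¬ PySem.Str.startswith s "at " = true) :
    pvGStep (t, c, false) s = (t, c, false) := by
  simp only [pvGStep]; rw [if_neg hA, if_neg (by simp)]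

theorem pvGStep_caused (t c : List String) (s : String)
    (hA : ¬ PySem.Str.startswith s "at " = true)
    (hC : PySem.Str.startswith s "Caused by:" = true) :
    pvGStep (t, c, true) s = (t, c ++ [s], true) := by
  simp only [pvGStep]
  rw [if_neg hA, if_pos (by simp), if_neg (fun h => h.2.2 hC), if_pos hC]

theorem pvGStep_blank (t c : List String) (s : String)
    (hA : ¬ PySem.Str.startswith s "at " = true)
    (hC : ¬ PySem.Str.startswith s "Caused by:" = true)
    (hE : s = "") :
    pvGStep (t, c, true) s = (t, c, true) := by
  simp only [pvGStep]
  rw [if_neg hA, if_pos (by simp), if_neg (fun h => h.1 hE), if_neg hC]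

theorem pvGStep_other (t c : List String) (s : String)
    (hA : ¬ PySem.Str.startswith s "at " = true)
    (hC : ¬ PySem.Str.startswith s "Caused by:" = true)
    (hE : ¬ s = "") :
    pvGStep (t, c, true) s =
      (if c ≠ [] then t ++ [PySem.Str.join "\n" c] else t, [], false) := by
  simp only [pvGStep]
  rw [if_neg hA, if_pos (by simp), if_pos ⟨hE, hA, hC⟩]

-- evaluation lemmas for pvTakeBlock and pvBMain
theorem pvTakeBlock_blank (rest : List String) :
    pvTakeBlock ("" :: rest) = pvTakeBlock rest := by
  unfold pvTakeBlock
  rw [if_neg (by decide), if_pos rfl, pvTakeBlock.eq_def]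

theorem pvTakeBlock_other (s : String) (rest : List String)
    (hA : ¬ PySem.Str.startswith s "at " = true)
    (hC : ¬ PySem.Str.startswith s "Caused by:" = true)
    (hE : ¬ s = "") :
    pvTakeBlock (s :: rest) = ([], rest) := by
  unfold pvTakeBlock
  rw [if_neg (fun h => (Bool.or_eq_true_iff.mp h).elim hA hC), if_neg hE]

theorem pvBMain_nil : pvBMain [] = [] := by unfold pvBMain; rfl

theorem pvBMain_cons_at (s : String) (rest : List String)
    (hA : PySem.Str.startswith s "at " = true) :
    pvBMain (s :: rest) =
      PySem.Str.join "\n" (s :: (pvTakeBlock rest).1) :: pvBMain (pvTakeBlock rest).2 := by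
  unfold pvBMain
  rw [dif_pos hA, pvTakeBlock_keep s rest (Bool.or_eq_true_iff.mpr (Or.inl hA)), pvBMain.eq_def]

theorem pvBMain_cons_skip (s : String) (rest : List String)
    (hA : ¬ PySem.Str.startswith s "at " = true) :
    pvBMain (s :: rest) = pvBMain rest := by
  unfold pvBMain; rw [dif_neg hA, pvBMain.eq_def]

-- the loop invariant: A's fold (over stripped lines) + final flush = B's block scan
theorem pvMain : ∀ (l : List String),
    (∀ t, pvFinish (l.foldl pvGStep (t, [], false)) = t ++ pvBMain l) ∧
    (∀ t cur, cur ≠ [] → pvFinish (l.foldl pvGStep (t, cur, true)) =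
       t ++ PySem.Str.join "\n" (cur ++ (pvTakeBlock l).1) :: pvBMain (pvTakeBlock l).2) := by
  intro l
  induction l with
  | nil =>
    constructor
    · intro t; simp [pvFinish, pvBMain_nil]
    · intro t cur hcur; simp [pvFinish, pvTakeBlock, pvBMain_nil, hcur]
  | cons s rest ih =>
    obtain ⟨ih1, ih2⟩ := ih
    constructor
    · intro t
      by_cases hA : PySem.Str.startswith s "at " = true
      · rw [List.foldl_cons, pvGStep_at t [] false s hA, ih2 t ([] ++ [s]) (by simp),
          pvBMain_cons_at s rest hA]
        simp
      · rw [List.foldl_cons, pvGStep_off t [] s hA, ih1 t, pvBMain_cons_skip s rest hA]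
    · intro t cur hcur
      by_cases hA : PySem.Str.startswith s "at " = true
      · rw [List.foldl_cons, pvGStep_at t cur true s hA, ih2 t (cur ++ [s]) (by simp),
          pvTakeBlock_keep s rest (Bool.or_eq_true_iff.mpr (Or.inl hA))]
        simp
      · by_cases hC : PySem.Str.startswith s "Caused by:" = true
        · rw [List.foldl_cons, pvGStep_caused t cur s hA hC, ih2 t (cur ++ [s]) (by simp),
            pvTakeBlock_keep s rest (Bool.or_eq_true_iff.mpr (Or.inr hC))]
          simp
        · by_cases hE : s = ""
          · subst hE
            rw [List.foldl_cons, pvGStep_blank t cur "" hA hC rfl, ih2 t cur hcur,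
              pvTakeBlock_blank rest]
          · rw [List.foldl_cons, pvGStep_other t cur s hA hC hE, if_pos hcur,
              ih1 (t ++ [PySem.Str.join "\n" cur]), pvTakeBlock_other s rest hA hC hE]
            simp

-- ===== VERDICT (by name: the statement is the Claim_ definition above) =====
theorem extract_stack_traces_py_spec : Claim_equal_extract_stack_traces_py := by
  intro output _
  have hstep : pvAStep = fun st l => pvGStep st (PySem.Str.strip l) :=
    funext fun st => funext fun l => pvAStep_eq st l
  have hmain := (pvMain (((PySem.Str.split? output "\n").getD []).map PySem.Str.strip)).1 []
  simp only [pvFinish, List.nil_append] at hmain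
  unfold Spec_extract_stack_traces_py extract_stack_traces_py extract_stack_traces_py_alt
  simp only [hstep, ← List.foldl_map]
  exact hmain
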